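-- pv_equiv track=rewrite | github.com/thendralmagudapathi/RAG_wAgent_Financial | rag_local_streamlit.py | pick_default_model
-- ===== SOURCE A (Python) =====
-- def pick_default_model(available_models: list[str]) -> str:
--     """Pick a lightweight default model name from available models using heuristics."""
--     if not available_models:
--         return 'mistral'
--     low = [m.lower() for m in available_models]
--     # heuristics for light models: prefer names containing these substrings
--     prefs = ['tiny', 'mini', 'small', 'lite', 'llama-mini', 'oasst-mini', 'alpaca']
--     for p in prefs:
--         for m, lm in zip(available_models, low):
--             if p in lm:
--                 return m
--     # fallback to first available
--     return available_models[0]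
-- ===== SOURCE B (Python) =====
-- def pick_default_model(available_models: list[str]) -> str:
--     """Pick a lightweight default model name from available models using heuristics."""
--     if not available_models:
--         return 'mistral'
--     prefs = ['tiny', 'mini', 'small', 'lite', 'llama-mini', 'oasst-mini', 'alpaca']
--
--     def rank(m):
--         lm = m.lower()
--         return next((i for i, p in enumerate(prefs) if p in lm), len(prefs))
--
--     return min(enumerate(available_models), key=lambda t: (rank(t[1]), t[0]))[1]
-- ===== Notes on version B (the rewrite author's own statement) =====
-- stated objective: alternative
-- what changed: Replaces the pref-outer/model-inner nested scan with early return by a single argmin pass: each model gets a rank (index of the first matching pref substring, or len(prefs) as a sentinel) and min over enumerate with key (rank, position) picks the winner, the sentinel rank making the fallback to the first model automatic.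
import Mathlib
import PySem

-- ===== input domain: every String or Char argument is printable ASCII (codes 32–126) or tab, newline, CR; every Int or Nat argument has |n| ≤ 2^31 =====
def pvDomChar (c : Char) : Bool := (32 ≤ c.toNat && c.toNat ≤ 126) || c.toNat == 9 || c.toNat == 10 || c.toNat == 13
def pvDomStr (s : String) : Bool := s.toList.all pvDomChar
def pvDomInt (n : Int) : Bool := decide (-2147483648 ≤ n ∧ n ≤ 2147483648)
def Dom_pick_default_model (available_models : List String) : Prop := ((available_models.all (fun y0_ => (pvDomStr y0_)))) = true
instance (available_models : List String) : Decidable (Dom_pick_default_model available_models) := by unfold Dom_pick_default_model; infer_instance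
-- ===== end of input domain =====

-- B replaces A's pref-outer/model-inner nested scan with early return by a single
-- argmin pass: rank each model by the first matching pref (sentinel len(prefs)) and
-- take min over enumerate with key (rank, position). Same cost; alternative decomposition.

-- ===== PORT A =====
-- 'for p in prefs: for m, lm in zip(available_models, low): if p in lm: return m'
-- is the structural findSome? over prefs of the inner find? over the zip.
def pick_default_model (available_models : List String) : String :=
  match available_models with
  | [] => "mistral"
  | m0 :: _ =>
    let low := available_models.map PySem.Str.lower
    let prefs := ["tiny", "mini", "small", "lite", "llama-mini", "oasst-mini", "alpaca"]
    match prefs.findSome? (fun p =>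
        ((available_models.zip low).find? (fun ml => PySem.Str.isIn p ml.2)).map Prod.fst) with
    | some m => m
    | none => m0   -- fallback: available_models[0]

-- ===== PORT B =====
-- rank(m) = next((i for i, p in enumerate(prefs) if p in lm), len(prefs))
def pvRank (prefs : List String) (m : String) : Int :=
  let lm := PySem.Str.lower m
  match (PySem.List.enumerate prefs).find? (fun ip => PySem.Str.isIn ip.2 lm) with
  | some ip => ip.1
  | none => (prefs.length : Int)

-- min(enumerate(available_models), key=lambda t: (rank(t[1]), t[0]))[1]
def pick_default_model_alt (available_models : List String) : String :=
  match available_models with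
  | [] => "mistral"
  | _ :: _ =>
    let prefs := ["tiny", "mini", "small", "lite", "llama-mini", "oasst-mini", "alpaca"]
    match PySem.List.min2? (PySem.List.enumerate available_models)
        (fun t => pvRank prefs t.2) (fun t => t.1) with
    | some t => t.2
    | none => ""   -- unreachable: Python's min runs on a nonempty iterable here

-- ===== PRECONDITION & SPEC =====
def Spec_pick_default_model (available_models : List String) (out : String) : Prop := out = pick_default_model_alt available_models
instance (available_models : List String) (out : String) : Decidable (Spec_pick_default_model available_models out) := by unfold Spec_pick_default_model; infer_instance

-- ===== CLAIM (what is proved, stated in full; the proofs are below) =====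
def Claim_equal_pick_default_model : Prop := ∀ (available_models : List String), Dom_pick_default_model available_models → Spec_pick_default_model available_models (pick_default_model available_models)

-- ===== LEMMAS AND PROOFS =====

theorem pv_find?_congr {α : Type} (p q : α → Bool) (l : List α)
    (h : ∀ a ∈ l, p a = q a) : l.find? p = l.find? q := by
  induction l with
  | nil => rfl
  | cons a t ih =>
    simp only [List.find?_cons, h a (by simp)]
    cases q a
    · exact ih (fun x hx => h x (by simp [hx]))
    · rfl

-- the running "first element with strictly smaller rank wins" fold
def pvFirstMin (r : String → Int) (b : String) (t : List String) : String :=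
  t.foldl (fun b x => if r x < r b then x else b) b

-- A's inner loop over the zip is a find? over the models themselves.
theorem pv_zipfind (p : String) (ams : List String) :
    ((ams.zip (ams.map PySem.Str.lower)).find? (fun ml => PySem.Str.isIn p ml.2)).map Prod.fst
      = ams.find? (fun m => PySem.Str.isIn p (PySem.Str.lower m)) := by
  induction ams with
  | nil => rfl
  | cons a t ih =>
    simp only [List.map_cons, List.zip_cons_cons, List.find?_cons]
    by_cases h : PySem.Chars.isIn p.toList (PySem.Chars.lower a.toList) = true
    · simp [h]
    · simp only [Bool.not_eq_true] at h
      simpa [h] using ih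

-- shifting the start of enumerate only shifts the index returned by find?
theorem pv_enum_shift (q : String → Bool) (ps : List String) (s : Int) :
    (PySem.List.enumerate ps (s+1)).find? (fun ip => q ip.2)
      = ((PySem.List.enumerate ps s).find? (fun ip => q ip.2)).map (fun ip => (ip.1 + 1, ip.2)) := by
  induction ps generalizing s with
  | nil => rfl
  | cons a t ih =>
    simp only [PySem.List.enumerate_cons, List.find?_cons]
    by_cases h : q a = true
    · simp [h]
    · simp only [Bool.not_eq_true] at h
      simpa [h] using ih (s + 1)

theorem pv_enum_shift1 (q : String → Bool) (ps : List String) :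
    (PySem.List.enumerate ps 1).find? (fun ip => q ip.2)
      = ((PySem.List.enumerate ps 0).find? (fun ip => q ip.2)).map (fun ip => (ip.1 + 1, ip.2)) := by
  simpa using pv_enum_shift q ps 0

theorem pvRank_nil (m : String) : pvRank [] m = 0 := rfl

theorem pvRank_cons (p : String) (ps : List String) (m : String) :
    pvRank (p :: ps) m =
      if PySem.Str.isIn p (PySem.Str.lower m) then 0 else 1 + pvRank ps m := by
  by_cases h : PySem.Chars.isIn p.toList (PySem.Chars.lower m.toList) = true
  · simp [pvRank, PySem.List.enumerate_cons, h]
  · simp only [Bool.not_eq_true] at h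
    simp only [pvRank, PySem.List.enumerate_cons, List.find?_cons, PySem.Str.isIn_eq,
      PySem.Str.toList_lower, h, Bool.false_eq_true, if_false]
    rw [show ((0 : Int) + 1) = 1 from rfl,
        pv_enum_shift1 (fun x => PySem.Chars.isIn x.toList (PySem.Chars.lower m.toList)) ps]
    cases hf : (PySem.List.enumerate ps 0).find?
        (fun ip => PySem.Chars.isIn ip.2.toList (PySem.Chars.lower m.toList)) with
    | none => simp; ring
    | some ip => simp; ring

theorem pvRank_nonneg (ps : List String) (m : String) : 0 ≤ pvRank ps m := by
  induction ps with
  | nil => simp [pvRank_nil]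
  | cons p t ih =>
    rw [pvRank_cons]
    split <;> omega

-- the fold keeps its accumulator when nothing beats it
theorem pv_fold_keep (r : String → Int) (t : List String) (b : String)
    (h : ∀ x ∈ t, r b ≤ r x) : pvFirstMin r b t = b := by
  induction t with
  | nil => rfl
  | cons x t ih =>
    have hx := h x (by simp)
    simp only [pvFirstMin, List.foldl_cons]
    rw [if_neg (by omega)]
    exact ih (fun y hy => h y (by simp [hy]))

-- with a nonnegative rank that hits 0 somewhere, the fold is the first rank-0 element
theorem pv_fold_zero (r : String → Int) (t : List String) (b : String)
    (hnn : ∀ x ∈ b :: t, 0 ≤ r x) (hex : ∃ x ∈ b :: t, r x = 0) :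
    pvFirstMin r b t = ((b :: t).find? (fun x => r x == 0)).getD b := by
  induction t generalizing b with
  | nil =>
    obtain ⟨x, hx, hx0⟩ := hex
    simp only [List.mem_singleton] at hx
    subst hx
    simp [pvFirstMin, hx0]
  | cons x t ih =>
    by_cases hb : r b = 0
    · rw [pv_fold_keep r _ b (fun y hy => by have := hnn y (by simp [hy]); omega)]
      simp [hb]
    · have hbpos : 0 < r b := lt_of_le_of_ne (hnn b (by simp)) (Ne.symm hb)
      simp only [pvFirstMin, List.foldl_cons]
      by_cases hx : r x < r b
      · have h1 : pvFirstMin r x t = ((x :: t).find? (fun y => r y == 0)).getD x :=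
          ih x (fun y hy => hnn y (by simp at hy ⊢; tauto))
            (by obtain ⟨y, hy, hy0⟩ := hex
                refine ⟨y, ?_, hy0⟩
                simp at hy ⊢
                rcases hy with h | h | h
                · exact absurd (h ▸ hy0) hb
                · tauto
                · tauto)
        simp only [pvFirstMin] at h1
        rw [if_pos hx, h1]
        by_cases hx0 : r x = 0
        · simp [hb, hx0]
        · simp only [List.find?_cons, show (r b == 0) = false by simpa using hb,
            show (r x == 0) = false by simpa using hx0]
          obtain ⟨y, hy, hy0⟩ := hex
          have hyt : y ∈ t := by
            simp at hy
            rcases hy with h' | h' | h'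
            · exact absurd (h' ▸ hy0) hb
            · exact absurd (h' ▸ hy0) hx0
            · exact h'
          cases hft : List.find? (fun y => r y == 0) t with
          | some w => simp
          | none =>
            exact absurd (by simpa using List.find?_eq_none.mp hft y hyt) (by simp [hy0])
      · have h1 : pvFirstMin r b t = ((b :: t).find? (fun y => r y == 0)).getD b :=
          ih b (fun y hy => hnn y (by simp at hy ⊢; tauto))
            (by obtain ⟨y, hy, hy0⟩ := hex
                refine ⟨y, ?_, hy0⟩
                simp at hy ⊢
                have hx0 : r x ≠ 0 := by
                  intro h0; rw [h0] at hx; omega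
                rcases hy with h | h | h
                · tauto
                · exact absurd (h ▸ hy0) hx0
                · tauto)
        simp only [pvFirstMin] at h1
        rw [if_neg hx, h1]
        have hx0 : r x ≠ 0 := by intro h0; rw [h0] at hx; omega
        simp [hb, hx0]

-- the fold only compares ranks, so a uniform +1 shift does not change it
theorem pv_fold_shift (r1 r2 : String → Int) (t : List String) (b : String)
    (h : ∀ x ∈ b :: t, r1 x = 1 + r2 x) : pvFirstMin r1 b t = pvFirstMin r2 b t := by
  induction t generalizing b with
  | nil => rfl
  | cons x t ih =>
    have hb := h b (by simp)
    have hx := h x (by simp)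
    simp only [pvFirstMin, List.foldl_cons]
    have hcond : (r1 x < r1 b) ↔ (r2 x < r2 b) := by omega
    by_cases hc : r2 x < r2 b
    · rw [if_pos (hcond.mpr hc), if_pos hc]
      exact ih x (fun y hy => by simp at hy; rcases hy with h' | h' <;> [exact h' ▸ hx; exact h y (by simp [h'])])
    · rw [if_neg (fun hh => hc (hcond.mp hh)), if_neg hc]
      exact ih b (fun y hy => by simp at hy; rcases hy with h' | h' <;> [exact h' ▸ hb; exact h y (by simp [h'])])

-- A's priority scan equals the rank-argmin fold
theorem pv_main (prefs : List String) (b : String) (t : List String) :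
    (match prefs.findSome? (fun p => (b :: t).find? (fun m => PySem.Str.isIn p (PySem.Str.lower m))) with
     | some m => m
     | none => b)
      = pvFirstMin (pvRank prefs) b t := by
  induction prefs with
  | nil =>
    rw [pv_fold_keep _ _ _ (fun x _ => by simp [pvRank_nil])]
    rfl
  | cons p ps ih =>
    simp only [List.findSome?_cons]
    cases hf : (b :: t).find? (fun m => PySem.Str.isIn p (PySem.Str.lower m)) with
    | none =>
      have hall : ∀ m ∈ b :: t, ¬ (PySem.Str.isIn p (PySem.Str.lower m) = true) := by
        intro m hm
        exact (List.find?_eq_none.mp hf) m hm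
      rw [pv_fold_shift (pvRank (p :: ps)) (pvRank ps) t b
        (fun x hx => by rw [pvRank_cons, if_neg (hall x hx)])]
      exact ih
    | some mhat =>
      have hm : mhat ∈ b :: t :=
        List.mem_of_find?_eq_some (p := fun m => PySem.Str.isIn p (PySem.Str.lower m)) hf
      have hmatch : PySem.Str.isIn p (PySem.Str.lower mhat) = true :=
        List.find?_some (p := fun m => PySem.Str.isIn p (PySem.Str.lower m)) hf
      have hz : pvRank (p :: ps) mhat = 0 := by
        rw [pvRank_cons, if_pos hmatch]
      have hcong : (b :: t).find? (fun x => pvRank (p :: ps) x == 0)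
          = (b :: t).find? (fun m => PySem.Str.isIn p (PySem.Str.lower m)) := by
        apply pv_find?_congr
        intro x _
        rw [pvRank_cons]
        by_cases h : PySem.Str.isIn p (PySem.Str.lower x) = true
        · rw [if_pos h, h]; rfl
        · rw [Bool.not_eq_true] at h
          rw [if_neg (by rw [h]; simp), h, beq_eq_false_iff_ne]
          have := pvRank_nonneg ps x
          omega
      rw [pv_fold_zero (pvRank (p :: ps)) t b (fun x _ => pvRank_nonneg _ x) ⟨mhat, hm, hz⟩,
          hcong, hf]
      rfl

-- B's min2? over enumerate is exactly that fold (indices strictly increase, so the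
-- positional tie-break never replaces the accumulator)
theorem pv_min2_fold_gen (r : String → Int)
    (step : Option (Int × String) → Int × String → Option (Int × String))
    (hstep : ∀ (i : Int) (b : String) (s : Int) (x : String), i < s →
      step (some (i, b)) (s, x) = if r x < r b then some (s, x) else some (i, b)) :
    ∀ (t : List String) (s i : Int) (b : String), i < s →
    ∃ j, List.foldl step (some (i, b)) (PySem.List.enumerate t s) = some (j, pvFirstMin r b t) := by
  intro t
  induction t with
  | nil => intro s i b _; exact ⟨i, rfl⟩
  | cons x t ih =>
    intro s i b his
    simp only [PySem.List.enumerate_cons, List.foldl_cons, hstep i b s x his]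
    by_cases hc : r x < r b
    · rw [if_pos hc]
      obtain ⟨j, hj⟩ := ih (s + 1) s x (by omega)
      exact ⟨j, by rw [hj]; simp [pvFirstMin, hc]⟩
    · rw [if_neg hc]
      obtain ⟨j, hj⟩ := ih (s + 1) i b (by omega)
      exact ⟨j, by rw [hj]; simp [pvFirstMin, hc]⟩

-- min2? over the enumeration of a nonempty list is the fold above
theorem pv_min2_cons (r : String → Int) (b : String) (t : List String) :
    ∃ j, PySem.List.min2? (PySem.List.enumerate (b :: t)) (fun p => r p.2) (fun p => p.1)
      = some (j, pvFirstMin r b t) := by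
  simp only [PySem.List.min2?, PySem.List.enumerate_cons, List.foldl_cons]
  exact pv_min2_fold_gen r _
    (fun i b' s x his => by
      have hns : ¬ (s < i) := by omega
      by_cases hc : r x < r b' <;> simp [hc, hns])
    t (0 + 1) 0 b (by omega)

-- ===== VERDICT (by name: the statement is the Claim_ definition above) =====
theorem pick_default_model_spec : Claim_equal_pick_default_model := by
  intro ams _
  unfold Spec_pick_default_model
  cases ams with
  | nil => rfl
  | cons b t =>
    simp only [pick_default_model, pick_default_model_alt, pv_zipfind]
    rw [pv_main]
    obtain ⟨j, hj⟩ := pv_min2_cons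
      (pvRank ["tiny", "mini", "small", "lite", "llama-mini", "oasst-mini", "alpaca"]) b t
    rw [hj]
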